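-- pv_equiv track=rewrite | github.com/HaFred/vllm | benchmarks/openonerec/noninvasive_bench_serve/evaluation.py | extract_ids_from_answer
-- ===== SOURCE A (Python) =====
-- def extract_ids_from_answer(answer: str) -> set[str]:
--     """Extract all SIDs from answer field.
--
--     >>> extract_ids_from_answer("<|sid_begin|>123<|sid_end|><|sid_begin|>456<|sid_end|>")
--     {'123', '456'}
--     """
--     correct_answers: set[str] = set()
--     for part in answer.split('<|sid_begin|>'):
--         if '<|sid_end|>' in part:
--             sid = part.split('<|sid_end|>')[0].strip()
--             if sid:
--                 correct_answers.add(sid)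
--     return correct_answers
-- ===== SOURCE B (Python) =====
-- def extract_ids_from_answer(answer: str) -> set[str]:
--     """Extract all SIDs: single left-to-right state-machine scan instead of nested splits."""
--     BEGIN, END = '<|sid_begin|>', '<|sid_end|>'
--     result: set[str] = set()
--     buf: list[str] = []
--     active = True          # collecting since start-of-string or the last begin marker
--     i, n = 0, len(answer)
--     while i < n:
--         if answer.startswith(BEGIN, i):
--             buf = []
--             active = True
--             i += len(BEGIN)
--         elif answer.startswith(END, i):
--             if active:
--                 sid = ''.join(buf).strip()
--                 if sid:
--                     result.add(sid)
--                 active = False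
--             i += len(END)
--         else:
--             if active:
--                 buf.append(answer[i])
--             i += 1
--     return result
-- ===== Notes on version B (the rewrite author's own statement) =====
-- stated objective: alternative
-- what changed: Replaced A's split-by-begin-marker plus a second split-by-end-marker inside each part with a single left-to-right state-machine scan that matches markers in place and accumulates the current segment in a buffer.
import Mathlib
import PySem

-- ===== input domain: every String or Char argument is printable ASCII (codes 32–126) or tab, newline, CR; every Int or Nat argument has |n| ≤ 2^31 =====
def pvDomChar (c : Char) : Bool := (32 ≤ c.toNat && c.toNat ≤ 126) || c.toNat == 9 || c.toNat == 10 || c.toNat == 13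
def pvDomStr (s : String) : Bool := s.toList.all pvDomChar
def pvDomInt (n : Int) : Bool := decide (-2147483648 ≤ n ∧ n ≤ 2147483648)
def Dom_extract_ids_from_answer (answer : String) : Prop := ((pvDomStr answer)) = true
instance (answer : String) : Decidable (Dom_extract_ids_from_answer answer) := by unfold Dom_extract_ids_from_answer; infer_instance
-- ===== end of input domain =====

-- B replaces A's nested marker splits by one left-to-right state-machine scan (objective: alternative algorithm, single pass).
-- Python's set is returned as the list of its distinct elements (compared as a finite set).

-- ===== PORT A =====
-- A: for part in answer.split('<|sid_begin|>'): if end-marker in part, sid = part.split(end)[0].strip(); add if nonempty.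
-- part.split(sep) is never empty, so Python's [0] is ported as .headD "".
def extract_ids_from_answer (answer : String) : List String :=
  ((PySem.Str.split? answer "<|sid_begin|>").getD []).foldl
    (fun correct_answers part =>
      if PySem.Str.isIn "<|sid_end|>" part then
        let sid := PySem.Str.strip (((PySem.Str.split? part "<|sid_end|>").getD []).headD "")
        if sid ≠ "" then PySem.Set.add correct_answers sid else correct_answers
      else correct_answers)
    []

-- ===== PORT B =====
def bgM : List Char := "<|sid_begin|>".toList
def enM : List Char := "<|sid_end|>".toList

-- the while-loop of Source B: i-indexed startswith tests become isPrefixOf on the current suffix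
def scanSids : List Char → PySem.Set String → List Char → Bool → PySem.Set String
  | [], result, _, _ => result
  | c :: rest, result, buf, active =>
    if bgM.isPrefixOf (c :: rest) then
      scanSids ((c :: rest).drop bgM.length) result [] true
    else if enM.isPrefixOf (c :: rest) then
      scanSids ((c :: rest).drop enM.length)
        (if active then
          (let sid := PySem.Chars.strip buf
           if sid ≠ [] then PySem.Set.add result (String.ofList sid) else result)
         else result)
        buf false
    else
      scanSids rest result (if active then buf ++ [c] else buf) active
  termination_by l => l.length
  decreasing_by all_goals simp [bgM, enM]

def extract_ids_from_answer_alt (answer : String) : List String :=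
  scanSids answer.toList [] [] true

-- ===== PRECONDITION & SPEC =====
def Spec_extract_ids_from_answer (answer : String) (out : List String) : Prop := out = extract_ids_from_answer_alt answer
instance (answer : String) (out : List String) : Decidable (Spec_extract_ids_from_answer answer out) := by unfold Spec_extract_ids_from_answer; infer_instance

-- ===== CLAIM (what is proved, stated in full; the proofs are below) =====
def Claim_equal_extract_ids_from_answer : Prop := ∀ (answer : String), Dom_extract_ids_from_answer answer → Spec_extract_ids_from_answer answer (extract_ids_from_answer answer)

-- ===== LEMMAS AND PROOFS =====

-- a clean well-founded recursion equal to PySem.Chars.splitOn (which is fuel-based)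
def splitR (sep : List Char) (l : List Char) : List (List Char) :=
  match l with
  | [] => [[]]
  | c :: rest =>
    if sep.isPrefixOf (c :: rest) ∧ sep ≠ [] then
      [] :: splitR sep ((c :: rest).drop sep.length)
    else
      (splitR sep rest).modifyHead (c :: ·)
  termination_by l.length
  decreasing_by
    · rename_i h; cases sep with
      | nil => simp at h
      | cons a as => simp
    · simp

-- the chars of the current part before the first begin marker
def takeBg : List Char → List Char
  | [] => []
  | c :: rest => if bgM.isPrefixOf (c :: rest) then [] else c :: takeBg rest

-- the suffix after the first begin marker, if any
def afterBg : List Char → Option (List Char)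
  | [] => none
  | c :: rest => if bgM.isPrefixOf (c :: rest) then some ((c :: rest).drop bgM.length) else afterBg rest

-- part.split(end)[0]
def takeEn : List Char → List Char
  | [] => []
  | c :: rest => if enM.isPrefixOf (c :: rest) then [] else c :: takeEn rest

-- the common normal form of both programs: fold A's per-part step over the parts as char lists
def stepPart (res : PySem.Set String) (p : List Char) : PySem.Set String :=
  if PySem.Chars.isIn enM p then
    (let sid := PySem.Chars.strip (takeEn p)
     if sid ≠ [] then PySem.Set.add res (String.ofList sid) else res)
  else res

def foldParts (res : PySem.Set String) (parts : List (List Char)) : PySem.Set String :=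
  parts.foldl stepPart res

theorem modifyHead_modifyHead {α : Type} (f g : α → α) (xs : List α) :
    (xs.modifyHead g).modifyHead f = xs.modifyHead (fun x => f (g x)) := by
  cases xs <;> simp

theorem modifyHead_id' {α : Type} (xs : List (List α)) :
    xs.modifyHead (fun x => ([] : List α) ++ x) = xs := by
  cases xs <;> simp

theorem modifyHead_fun_id {α : Type} (xs : List α) :
    xs.modifyHead (fun x => x) = xs := by
  cases xs <;> simp

theorem splitR_ne_nil (sep l : List Char) : splitR sep l ≠ [] := by
  fun_induction splitR sep l with
  | case1 => simp
  | case2 => simp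
  | case3 _ _ _ ih => cases h : splitR sep _ <;> simp_all

theorem go_eq (sep : List Char) (hsep : sep ≠ []) :
    ∀ fuel l cur acc, l.length < fuel →
      PySem.Chars.splitOn.go sep fuel l cur acc
        = acc.reverse ++ (splitR sep l).modifyHead (fun p => cur.reverse ++ p) := by
  intro fuel
  induction fuel with
  | zero => intro l cur acc h; omega
  | succ fuel ih =>
    intro l cur acc h
    cases l with
    | nil => simp [PySem.Chars.splitOn.go, splitR]
    | cons c rest =>
      rw [PySem.Chars.splitOn.go]
      by_cases hp : sep.isPrefixOf (c :: rest)
      · have hs : 1 ≤ sep.length := by cases sep with | nil => simp at hsep | cons a as => simp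
        rw [if_pos hp, ih _ _ _ (by simp at h ⊢; omega)]
        rw [splitR, if_pos ⟨hp, hsep⟩]
        simp [modifyHead_fun_id]
      · rw [if_neg hp, ih _ _ _ (by simp at h ⊢; omega)]
        rw [splitR, if_neg (by simp [hp])]
        rw [modifyHead_modifyHead]
        have : (fun x => (c :: cur).reverse ++ x) = fun x => cur.reverse ++ (c :: x) := by
          funext x; simp
        rw [this]

theorem splitOn_eq_splitR (sep l : List Char) (hsep : sep ≠ []) :
    PySem.Chars.splitOn l sep = splitR sep l := by
  rw [PySem.Chars.splitOn, go_eq sep hsep _ _ _ _ (by omega)]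
  simp [modifyHead_fun_id]

theorem enM_ne_nil : enM ≠ [] := by decide

theorem bgM_ne_nil : bgM ≠ [] := by decide

theorem splitR_head_en (l : List Char) : (splitR enM l).headD [] = takeEn l := by
  fun_induction splitR enM l with
  | case1 => simp [takeEn]
  | case2 c rest h => rw [takeEn, if_pos h.1]; simp
  | case3 c rest h ih =>
    rw [takeEn, if_neg (fun hp => h ⟨hp, enM_ne_nil⟩)]
    cases hx : splitR enM rest with
    | nil => exact absurd hx (splitR_ne_nil _ _)
    | cons a t => rw [hx] at ih; simp at ih ⊢; exact ih

theorem splitR_bg_struct (l : List Char) :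
    splitR bgM l = takeBg l ::
      (match afterBg l with | none => [] | some l' => splitR bgM l') := by
  fun_induction splitR bgM l with
  | case1 => simp [takeBg, afterBg]
  | case2 c rest h => rw [takeBg, if_pos h.1, afterBg, if_pos h.1]
  | case3 c rest h ih =>
    have hp : ¬ bgM.isPrefixOf (c :: rest) = true := fun hp => h ⟨hp, bgM_ne_nil⟩
    rw [takeBg, if_neg hp, afterBg, if_neg hp, ih]
    simp

theorem takeBg_prefix (l : List Char) : takeBg l <+: l := by
  induction l with
  | nil => simp [takeBg]
  | cons c rest ih =>
    rw [takeBg]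
    split
    · simp
    · exact List.cons_prefix_cons.mpr ⟨rfl, ih⟩

-- an unbroken prefix of l (no begin marker starting in it) stays inside takeBg
theorem take_prefix_takeBg (l : List Char) : ∀ (k : Nat), k ≤ l.length →
    (∀ i, i < k → ¬ bgM <+: l.drop i) → l.take k <+: takeBg l := by
  induction l with
  | nil => intro k hk _; simp at hk; subst hk; simp
  | cons c rest ih =>
    intro k hk h
    cases k with
    | zero => simp
    | succ k =>
      have h0 : ¬ bgM <+: (c :: rest) := by simpa using h 0 (by omega)
      rw [takeBg, if_neg (fun hp => h0 (List.isPrefixOf_iff_prefix.mp hp))]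
      rw [List.take_succ_cons]
      exact List.cons_prefix_cons.mpr ⟨rfl,
        ih k (by simpa using hk) (fun i hi => by simpa using h (i + 1) (by omega))⟩

theorem takeEn_eq_take (p : List Char) (k : Nat) (hk : k ≤ p.length)
    (h : ∀ i, i < k → ¬ enM <+: p.drop i) (hen : enM <+: p.drop k) :
    takeEn p = p.take k := by
  induction p generalizing k with
  | nil =>
    rw [List.drop_nil] at hen
    exact absurd (List.prefix_nil.mp hen) enM_ne_nil
  | cons c rest ih =>
    cases k with
    | zero =>
      rw [List.drop_zero] at hen
      rw [takeEn, if_pos (List.isPrefixOf_iff_prefix.mpr hen)]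
      simp
    | succ k =>
      have h0 : ¬ enM <+: (c :: rest) := by simpa using h 0 (by omega)
      rw [takeEn, if_neg (fun hp => h0 (List.isPrefixOf_iff_prefix.mp hp))]
      rw [List.take_succ_cons]
      exact congrArg (c :: ·) (ih k (by simpa using hk)
        (fun i hi => by simpa using h (i + 1) (by omega)) (by simpa using hen))

theorem afterBg_drop (l : List Char) (k : Nat) (hk : k ≤ l.length)
    (h : ∀ i, i < k → ¬ bgM <+: l.drop i) : afterBg l = afterBg (l.drop k) := by
  induction k generalizing l with
  | zero => simp
  | succ k ih =>
    cases l with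
    | nil => simp at hk
    | cons c rest =>
      have h0 : ¬ bgM <+: (c :: rest) := by simpa using h 0 (by omega)
      rw [afterBg, if_neg (fun hp => h0 (List.isPrefixOf_iff_prefix.mp hp))]
      rw [List.drop_succ_cons]
      exact ih rest (by simpa using hk) (fun i hi => by simpa using h (i + 1) (by omega))

-- a marker begins with '<'; prefixes carry first elements over
theorem prefix_getElem0 (m x : List Char) (hm : m <+: x) (hne : m ≠ []) : x[0]? = m[0]? := by
  obtain ⟨s, rfl⟩ := hm
  exact List.getElem?_append_left (by cases m with | nil => simp at hne | cons a t => simp)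

-- no marker occurrence starts strictly inside a marker occurrence ('<' only at offset 0)
theorem gap_aux (m l : List Char) (hm : m <+: l)
    (hchars : ∀ i, 1 ≤ i → i < m.length → m[i]? ≠ some '<') :
    ∀ i, 1 ≤ i → i < m.length → ¬ bgM <+: l.drop i ∧ ¬ enM <+: l.drop i := by
  intro i h1 h2
  obtain ⟨t, rfl⟩ := hm
  have hd : (m ++ t).drop i = m.drop i ++ t := List.drop_append_of_le_length (by omega)
  have hkey : ∀ mk : List Char, mk[0]? = some '<' → ¬ mk <+: (m ++ t).drop i := by
    intro mk hmk hp
    rw [hd] at hp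
    have h0 : (m.drop i ++ t)[0]? = mk[0]? :=
      prefix_getElem0 mk _ hp (by intro hnil; rw [hnil] at hmk; simp at hmk)
    rw [List.getElem?_append_left (by simp; omega), List.getElem?_drop] at h0
    exact hchars i h1 (by omega) (by rw [hmk] at h0; simpa using h0)
  exact ⟨hkey bgM (by decide), hkey enM (by decide)⟩

theorem en_gap (l : List Char) (hen : enM <+: l) :
    ∀ i, 1 ≤ i → i < enM.length → ¬ bgM <+: l.drop i ∧ ¬ enM <+: l.drop i :=
  gap_aux enM l hen (by decide)

def SafeBuf (buf l : List Char) : Prop :=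
  ∀ i, i < buf.length → ¬ bgM <+: (buf ++ l).drop i ∧ ¬ enM <+: (buf ++ l).drop i

theorem safeBuf_no_en (buf l : List Char) (h : SafeBuf buf l) :
    ∀ j, j < buf.length → ¬ enM <+: buf.drop j := fun j hj hp =>
  (h j hj).2 (by
    rw [List.drop_append_of_le_length (le_of_lt hj)]
    exact List.prefix_append_of_prefix hp)

theorem stepPart_no_en (res : PySem.Set String) (buf : List Char)
    (h : ∀ j, j < buf.length → ¬ enM <+: buf.drop j) : stepPart res buf = res := by
  rw [stepPart, if_neg]
  intro hin
  obtain ⟨j, hj⟩ := (PySem.Chars.exists_prefix_drop_iff_isIn enM buf).mpr hin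
  by_cases hjl : j < buf.length
  · exact h j hjl hj
  · rw [List.drop_of_length_le (by omega)] at hj
    exact enM_ne_nil (List.prefix_nil.mp hj)

theorem scan_main_aux : ∀ (n : Nat) (l : List Char), l.length ≤ n → ∀ (res : PySem.Set String) (buf : List Char),
    (SafeBuf buf l →
      scanSids l res buf true = foldParts res ((splitR bgM l).modifyHead (fun p => buf ++ p)))
    ∧ (scanSids l res buf false =
        (match afterBg l with | none => res | some l' => foldParts res (splitR bgM l'))) := by
  intro n
  induction n with
  | zero =>
    intro l hl res buf
    have : l = [] := by cases l with | nil => rfl | cons a t => simp at hl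
    subst this
    refine ⟨fun hs => ?_, by simp [scanSids, afterBg]⟩
    rw [scanSids, splitR]
    simp only [List.modifyHead, foldParts, List.foldl]
    rw [stepPart_no_en res (buf ++ []) (by
      simpa using safeBuf_no_en buf [] hs)]
  | succ n ih =>
    intro l hl res buf
    cases l with
    | nil =>
      refine ⟨fun hs => ?_, by simp [scanSids, afterBg]⟩
      rw [scanSids, splitR]
      simp only [List.modifyHead, foldParts, List.foldl]
      rw [stepPart_no_en res (buf ++ []) (by simpa using safeBuf_no_en buf [] hs)]
    | cons c rest =>
      have hlen1 : rest.length + 1 ≤ n + 1 := by simpa using hl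
      by_cases hbg : bgM.isPrefixOf (c :: rest)
      · -- begin marker: reset the buffer, part boundary
        have hdlen : ((c :: rest).drop bgM.length).length ≤ n := by simp [bgM]; omega
        constructor
        · intro hs
          rw [scanSids, if_pos hbg]
          rw [(ih _ hdlen res []).1 (fun i hi => by simp at hi), modifyHead_id']
          rw [splitR, if_pos ⟨hbg, bgM_ne_nil⟩]
          simp only [List.modifyHead_cons, foldParts, List.foldl_cons]
          rw [stepPart_no_en res (buf ++ []) (by
            intro j hj
            simp only [List.append_nil] at *
            exact safeBuf_no_en buf (c :: rest) hs j (by simpa using hj))]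
        · rw [scanSids, if_pos hbg]
          rw [(ih _ hdlen res []).1 (fun i hi => by simp at hi), modifyHead_id']
          rw [afterBg, if_pos hbg]
      · by_cases hen : enM.isPrefixOf (c :: rest)
        · -- end marker
          have henp : enM <+: (c :: rest) := List.isPrefixOf_iff_prefix.mp hen
          have hbgp : ¬ bgM <+: (c :: rest) := fun hp => hbg (List.isPrefixOf_iff_prefix.mpr hp)
          have hlen11 : enM.length ≤ (c :: rest).length := henp.length_le
          have hbg11 : ∀ i, i < enM.length → ¬ bgM <+: (c :: rest).drop i := by
            intro i hi
            cases Nat.eq_zero_or_pos i with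
            | inl h0 => subst h0; simpa using hbgp
            | inr h1 => exact (en_gap _ henp i h1 hi).1
          have hdlen : ((c :: rest).drop enM.length).length ≤ n := by simp [enM]; omega
          have hafter : afterBg (c :: rest) = afterBg ((c :: rest).drop enM.length) :=
            afterBg_drop _ enM.length hlen11 hbg11
          constructor
          · intro hs
            rw [scanSids, if_neg hbg, if_pos hen]
            rw [(ih _ hdlen _ buf).2]
            -- normal form of the right-hand side
            rw [splitR_bg_struct]
            have htk : enM <+: takeBg (c :: rest) := by
              have := take_prefix_takeBg (c :: rest) enM.length hlen11 hbg11
              rwa [← List.prefix_iff_eq_take.mp henp] at this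
            have hstep : stepPart res (buf ++ takeBg (c :: rest)) =
                (if PySem.Chars.strip buf ≠ [] then
                  PySem.Set.add res (String.ofList (PySem.Chars.strip buf)) else res) := by
              rw [stepPart, if_pos ((PySem.Chars.exists_prefix_drop_iff_isIn _ _).mp
                ⟨buf.length, by rw [List.drop_left]; exact htk⟩)]
              rw [takeEn_eq_take _ buf.length (by simp)
                (fun i hi hp => (hs i (by simpa using hi)).2 (by
                  rw [List.drop_append_of_le_length (le_of_lt hi)] at hp ⊢
                  exact hp.trans ((List.prefix_append_right_inj _).mpr (takeBg_prefix _))))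
                (by rw [List.drop_left]; exact htk)]
              rw [List.take_left]
            rw [← hafter]
            cases ha : afterBg (c :: rest) with
            | none => simp [foldParts, hstep]
            | some l' => simp [foldParts, hstep]
          · rw [scanSids, if_neg hbg, if_pos hen]
            simp only [Bool.false_eq_true, if_false]
            rw [(ih _ hdlen res buf).2, ← hafter]
        · -- ordinary character
          have hbgp : ¬ bgM <+: (c :: rest) := fun hp => hbg (List.isPrefixOf_iff_prefix.mpr hp)
          have henp : ¬ enM <+: (c :: rest) := fun hp => hen (List.isPrefixOf_iff_prefix.mpr hp)
          constructor
          · intro hs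
            rw [scanSids, if_neg hbg, if_neg hen]
            simp only [if_true]
            have hsafe : SafeBuf (buf ++ [c]) rest := by
              intro i hi
              have heq : (buf ++ [c]) ++ rest = buf ++ (c :: rest) := by simp
              rw [heq]
              by_cases hib : i < buf.length
              · exact hs i hib
              · have : i = buf.length := by simp at hi; omega
                subst this
                rw [List.drop_left]
                exact ⟨hbgp, henp⟩
            rw [(ih rest (by omega) res (buf ++ [c])).1 hsafe]
            rw [splitR, if_neg (by simp [hbg])]
            rw [modifyHead_modifyHead]
            have : (fun x => (buf ++ [c]) ++ x) = fun x : List Char => buf ++ (c :: x) := by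
              funext x; simp
            rw [this]
          · rw [scanSids, if_neg hbg, if_neg hen]
            simp only [Bool.false_eq_true, if_false]
            rw [(ih rest (by omega) res buf).2]
            rw [afterBg, if_neg hbg]

theorem scan_main (l : List Char) : ∀ res buf,
    (SafeBuf buf l →
      scanSids l res buf true = foldParts res ((splitR bgM l).modifyHead (fun p => buf ++ p)))
    ∧ (scanSids l res buf false =
        (match afterBg l with | none => res | some l' => foldParts res (splitR bgM l'))) :=
  fun res buf => scan_main_aux l.length l le_rfl res buf

theorem scan_true (l : List Char) (res : PySem.Set String) (buf : List Char) (h : SafeBuf buf l) :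
    scanSids l res buf true = foldParts res ((splitR bgM l).modifyHead (fun p => buf ++ p)) :=
  (scan_main l res buf).1 h

theorem headD_map_toList (qs : List String) :
    ((qs.headD "").toList) = (qs.map String.toList).headD [] := by
  cases qs <;> simp

theorem partStep_eq (res : PySem.Set String) (part : String) :
    (if PySem.Str.isIn "<|sid_end|>" part then
       let sid := PySem.Str.strip (((PySem.Str.split? part "<|sid_end|>").getD []).headD "")
       if sid ≠ "" then PySem.Set.add res sid else res
     else res) = stepPart res part.toList := by
  have hq : ((PySem.Str.split? part "<|sid_end|>").getD []).map String.toList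
      = splitR enM part.toList := by
    have hb := PySem.Str.split?_map part "<|sid_end|>"
    rw [PySem.Chars.split?] at hb
    rw [if_neg (by decide)] at hb
    cases hqq : PySem.Str.split? part "<|sid_end|>" with
    | none => rw [hqq] at hb; simp at hb
    | some qs =>
      rw [hqq] at hb
      simp only [Option.map_some, Option.some.injEq] at hb
      simpa [hb] using splitOn_eq_splitR enM part.toList enM_ne_nil
  have hsid : (PySem.Str.strip (((PySem.Str.split? part "<|sid_end|>").getD []).headD "")).toList
      = PySem.Chars.strip (takeEn part.toList) := by
    rw [PySem.Str.toList_strip, headD_map_toList, hq, splitR_head_en]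
  rw [stepPart, PySem.Str.isIn_eq]
  have hen : ("<|sid_end|>" : String).toList = enM := rfl
  rw [hen]
  by_cases hin : PySem.Chars.isIn enM part.toList = true
  · rw [if_pos hin, if_pos hin]
    simp only []
    rw [← hsid]
    by_cases hne : (PySem.Str.strip (((PySem.Str.split? part "<|sid_end|>").getD []).headD "")) = ""
    · rw [if_neg (not_not_intro hne), if_neg (not_not_intro (by rw [hne]; rfl))]
    · rw [if_pos hne, if_pos (fun h => hne (String.toList_eq_nil_iff.mp h)),
        String.ofList_toList]
  · rw [if_neg hin, if_neg hin]

theorem foldl_congr_step (f : PySem.Set String → String → PySem.Set String)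
    (hf : ∀ r p, f r p = stepPart r p.toList) :
    ∀ (ps : List String) (res : PySem.Set String),
      ps.foldl f res = foldParts res (ps.map String.toList) := by
  intro ps
  induction ps with
  | nil => intro res; simp [foldParts]
  | cons p ps ih =>
    intro res
    simp only [List.foldl_cons, List.map_cons, foldParts, List.foldl_cons]
    rw [hf res p]
    exact ih _

theorem A_eq_foldParts (answer : String) :
    extract_ids_from_answer answer = foldParts [] (splitR bgM answer.toList) := by
  rw [extract_ids_from_answer]
  have hps : ((PySem.Str.split? answer "<|sid_begin|>").getD []).map String.toList
      = splitR bgM answer.toList := by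
    have hb := PySem.Str.split?_map answer "<|sid_begin|>"
    rw [PySem.Chars.split?] at hb
    rw [if_neg (by decide)] at hb
    cases hqq : PySem.Str.split? answer "<|sid_begin|>" with
    | none => rw [hqq] at hb; simp at hb
    | some qs =>
      rw [hqq] at hb
      simp only [Option.map_some, Option.some.injEq] at hb
      simpa [hb] using splitOn_eq_splitR bgM answer.toList bgM_ne_nil
  rw [← hps]
  exact foldl_congr_step _ partStep_eq _ _

-- ===== VERDICT (by name: the statement is the Claim_ definition above) =====
theorem extract_ids_from_answer_spec : Claim_equal_extract_ids_from_answer := by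
  intro answer _
  unfold Spec_extract_ids_from_answer extract_ids_from_answer_alt
  rw [scan_true answer.toList [] [] (fun i hi => absurd hi (by simp)), modifyHead_id',
    A_eq_foldParts]
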